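-- pv_equiv track=rewrite | github.com/Tejas07PSK/lb_dsa_cracker | Dynamic Programming/Largest area rectangular sub-matrix with equal number of 1’s and 0’s [ IMP ]/solution.py | maximumArea
-- ===== SOURCE A (Python) =====
-- def maximumArea (mat, n, m):
--     row_sz, col_sz = len(mat), len(mat[0])
--     mx_rct_ar = 0
--     tmp_row_sum_arr = [0 for i in range(row_sz)]
--     seen_before = {}
--     for col_left in range(col_sz):
--         for col_right in range(col_left, col_sz):
--             for row in range(row_sz): tmp_row_sum_arr[row] += mat[row][col_right] if (mat[row][col_right] == 1) else -1
--             mx_col_sz = col_right - col_left + 1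
--             mx_row_sz = 0
--             tot = 0
--             for row in range(row_sz):
--                 tot += tmp_row_sum_arr[row]
--                 if (tmp_row_sum_arr[row] == 0): mx_row_sz = max(mx_row_sz, 1)
--                 if (tot == 0): mx_row_sz = max(mx_row_sz, (row + 1))
--                 if (tot in seen_before): mx_row_sz = max(mx_row_sz, (row - seen_before[tot]))
--                 else: seen_before[tot] = row
--                 if (col_right == (col_sz - 1)): tmp_row_sum_arr[row] = 0
--             mx_rct_ar = max(mx_rct_ar, (mx_row_sz * mx_col_sz))
--             seen_before.clear()
--     return mx_rct_ar
-- ===== SOURCE B (Python) =====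
-- def maximumArea(mat, n, m):
--     # Canonical brute force with a 2-D prefix-sum table: score each cell +1/-1,
--     # precompute P[i][j] = sum of scores above-left, then check every rectangle
--     # in O(1). No zero-sum-subarray scan, no hashmap.
--     R, C = len(mat), len(mat[0])
--     P = [[0] * (C + 1)]
--     for row in mat:
--         prev = P[-1]
--         acc = 0
--         cur = [0]
--         for j in range(C):
--             acc += 1 if row[j] == 1 else -1
--             cur.append(prev[j + 1] + acc)
--         P.append(cur)
--     best = 0
--     for top in range(R):
--         for bottom in range(top + 1, R + 1):
--             for left in range(C):
--                 for right in range(left + 1, C + 1):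
--                     if P[bottom][right] - P[top][right] - P[bottom][left] + P[top][left] == 0:
--                         area = (bottom - top) * (right - left)
--                         if area > best:
--                             best = area
--     return best
-- ===== Notes on version B (the rewrite author's own statement) =====
-- stated objective: simpler
-- what changed: Replaces A's column-pair sweep with its running row-sum array, prefix-sum hashmap and end-of-sweep reset trick by the canonical brute force: one 2-D prefix-sum table of the +1/-1 scores built first, then every rectangle checked in O(1) with the four-corner formula; no zero-sum-subarray scan and no hashmap at all.
import Mathlib
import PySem

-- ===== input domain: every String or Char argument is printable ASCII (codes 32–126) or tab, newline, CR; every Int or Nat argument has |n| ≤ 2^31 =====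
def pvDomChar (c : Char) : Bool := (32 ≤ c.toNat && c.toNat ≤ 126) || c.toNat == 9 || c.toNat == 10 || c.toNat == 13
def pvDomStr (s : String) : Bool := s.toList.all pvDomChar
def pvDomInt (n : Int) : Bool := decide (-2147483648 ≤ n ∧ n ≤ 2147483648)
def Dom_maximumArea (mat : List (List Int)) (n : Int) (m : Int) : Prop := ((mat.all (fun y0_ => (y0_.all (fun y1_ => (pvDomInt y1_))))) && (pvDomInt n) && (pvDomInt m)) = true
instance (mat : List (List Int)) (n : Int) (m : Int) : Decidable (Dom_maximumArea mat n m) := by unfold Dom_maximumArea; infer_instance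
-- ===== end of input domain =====

-- B replaces A's column-pair sweep with hashmap zero-sum scans by the canonical
-- brute force over all rectangles using a precomputed 2-D prefix-sum table (simpler; not faster).
-- ===== PORT A =====
-- A-side helpers: the three loops of A, each as a named fold step (literal transliteration).
-- mat[row][col] is read with pyGetD (defaults [] / 0): Python raises IndexError out of range;
-- Pre_maximumArea excludes exactly those inputs, so the defaults are never reached under Pre_.
def pvA_inner1Step (mat : List (List Int)) (col_right : Int) (t : List Int) (row : Int) : List Int :=
  t.set row.toNat (PySem.List.pyGetD t row 0 +
    (if PySem.List.pyGetD (PySem.List.pyGetD mat row []) col_right 0 = 1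
     then PySem.List.pyGetD (PySem.List.pyGetD mat row []) col_right 0 else -1))

def pvA_inner2Step (col_sz col_right : Int) (s : Int × Int × PySem.Dict Int Int × List Int)
    (row : Int) : Int × Int × PySem.Dict Int Int × List Int :=
  let t := PySem.List.pyGetD s.2.2.2 row 0
  let tot := s.2.1 + t
  let mxr := if t = 0 then max s.1 1 else s.1
  let mxr := if tot = 0 then max mxr (row + 1) else mxr
  match s.2.2.1.get? tot with
  | some r0 => (max mxr (row - r0), tot, s.2.2.1,
      if col_right = col_sz - 1 then s.2.2.2.set row.toNat 0 else s.2.2.2)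
  | none => (mxr, tot, s.2.2.1.insert tot row,
      if col_right = col_sz - 1 then s.2.2.2.set row.toNat 0 else s.2.2.2)

def pvA_pairStep (mat : List (List Int)) (row_sz col_sz col_left : Int)
    (st : Int × List Int × PySem.Dict Int Int) (col_right : Int) :
    Int × List Int × PySem.Dict Int Int :=
  let tmp := (PySem.List.pyRange 0 row_sz 1).foldl (pvA_inner1Step mat col_right) st.2.1
  let mx_col_sz := col_right - col_left + 1
  let inner := (PySem.List.pyRange 0 row_sz 1).foldl (pvA_inner2Step col_sz col_right)
    (0, 0, st.2.2, tmp)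
  (max st.1 (inner.1 * mx_col_sz), inner.2.2.2, PySem.Dict.empty)

def maximumArea (mat : List (List Int)) (n : Int) (m : Int) : Int :=
  let row_sz : Int := mat.length
  let col_sz : Int := (PySem.List.pyGetD mat 0 []).length
  ((PySem.List.pyRange 0 col_sz 1).foldl (fun st col_left =>
      (PySem.List.pyRange col_left col_sz 1).foldl
        (pvA_pairStep mat row_sz col_sz col_left) st)
    (0, (PySem.List.pyRange 0 row_sz 1).map (fun _ => (0 : Int)), PySem.Dict.empty)).1

-- ===== PORT B =====
-- B-side helpers: Source B's loops as named fold steps (literal transliteration).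
-- row[j] / prev[j+1] / P[i][j] are read with pyGetD (defaults 0 / []): Python raises
-- IndexError out of range; under Pre_maximumArea the defaults are never reached.
def pvB_rowStep (row prev : List Int) (s : Int × List Int) (j : Int) : Int × List Int :=
  let acc := s.1 + (if PySem.List.pyGetD row j 0 = 1 then 1 else -1)
  (acc, s.2 ++ [PySem.List.pyGetD prev (j + 1) 0 + acc])

def pvB_buildRow (C : Int) (prev row : List Int) : List Int :=
  ((PySem.List.pyRange 0 C 1).foldl (pvB_rowStep row prev) (0, [0])).2

def pvB_get (P : List (List Int)) (i j : Int) : Int :=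
  PySem.List.pyGetD (PySem.List.pyGetD P i []) j 0

def maximumArea_alt (mat : List (List Int)) (n : Int) (m : Int) : Int :=
  let R : Int := mat.length
  let C : Int := (PySem.List.pyGetD mat 0 []).length
  let P := mat.foldl (fun ps row =>
    ps ++ [pvB_buildRow C (PySem.List.pyGetD ps (-1) []) row])
    [PySem.List.pyRepeat [0] (C + 1)]
  (PySem.List.pyRange 0 R 1).foldl (fun best top =>
    (PySem.List.pyRange (top + 1) (R + 1) 1).foldl (fun best bottom =>
      (PySem.List.pyRange 0 C 1).foldl (fun best left =>
        (PySem.List.pyRange (left + 1) (C + 1) 1).foldl (fun best right =>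
          if pvB_get P bottom right - pvB_get P top right
              - pvB_get P bottom left + pvB_get P top left = 0 then
            (if (bottom - top) * (right - left) > best
             then (bottom - top) * (right - left) else best)
          else best) best) best) best) 0

-- ===== PRECONDITION & SPEC =====
-- Pre_ excludes exactly the inputs where the Python A raises IndexError: an empty matrix
-- (mat[0] fails) and, when the first row is nonempty, any row shorter than the first row.
def Pre_maximumArea (mat : List (List Int)) (n : Int) (m : Int) : Prop :=
  mat ≠ [] ∧ ∀ row ∈ mat, (mat.getD 0 []).length ≤ row.length

instance (mat : List (List Int)) (n : Int) (m : Int) : Decidable (Pre_maximumArea mat n m) := by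
  unfold Pre_maximumArea; infer_instance

def pvWitness_maximumArea : List (List Int) × Int × Int := ([[1, 0], [0, 1]], 2, 2)

def Spec_maximumArea (mat : List (List Int)) (n : Int) (m : Int) (out : Int) : Prop :=
  out = maximumArea_alt mat n m
instance (mat : List (List Int)) (n : Int) (m : Int) (out : Int) :
    Decidable (Spec_maximumArea mat n m out) := by unfold Spec_maximumArea; infer_instance

-- ===== CLAIM (what is proved, stated in full; the proofs are below) =====
def Claim_equal_maximumArea : Prop := ∀ (mat : List (List Int)) (n : Int) (m : Int),
  Dom_maximumArea mat n m → Pre_maximumArea mat n m → Spec_maximumArea mat n m (maximumArea mat n m)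

-- ===== LEMMAS AND PROOFS =====

def pvVal (x : Int) : Int := if x = 1 then 1 else -1
def pvCell (mat : List (List Int)) (r c : ℕ) : Int := pvVal ((mat.getD r []).getD c 0)
def pvPsum (xs : List Int) (k : ℕ) : Int := (xs.take k).sum
def pvFo (xs : List Int) (k : ℕ) (s : Int) : Option ℕ :=
  (List.range k).find? (fun i => pvPsum xs (i+1) == s)
def pvMaxEnd (xs : List Int) (j : ℕ) : ℕ :=
  match (List.range j).find? (fun i => pvPsum xs i == pvPsum xs j) with
  | some i => j - i
  | none => 0
def pvBU (xs : List Int) (k : ℕ) : ℕ :=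
  (List.range (k+1)).foldl (fun b j => max b (pvMaxEnd xs j)) 0
def pvZW (xs : List Int) : ℕ :=
  ((Finset.range (xs.length+1)) ×ˢ (Finset.range (xs.length+1))).sup
    (fun p => if p.1 < p.2 ∧ pvPsum xs p.1 = pvPsum xs p.2 then p.2 - p.1 else 0)

theorem pvPsum_zero (xs : List Int) : pvPsum xs 0 = 0 := rfl

theorem pvPsum_succ (xs : List Int) (k : ℕ) (h : k < xs.length) :
    pvPsum xs (k+1) = pvPsum xs k + xs.getD k 0 := by
  unfold pvPsum
  rw [List.take_add_one, List.sum_append, List.getElem?_eq_getElem h]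
  simp [List.getD_eq_getElem?_getD, List.getElem?_eq_getElem h]

theorem pvFo_zero (xs : List Int) (s : Int) : pvFo xs 0 s = none := rfl

theorem pvFo_succ (xs : List Int) (k : ℕ) (s : Int) :
    pvFo xs (k+1) s = ((pvFo xs k s).or (if pvPsum xs (k+1) = s then some k else none)) := by
  simp only [pvFo, List.range_succ, List.find?_append]
  congr 1
  simp [List.find?]
  split <;> simp_all

theorem pvFo_some (xs : List Int) (k : ℕ) (s : Int) (r : ℕ) (h : pvFo xs k s = some r) :
    r < k ∧ pvPsum xs (r+1) = s := by
  have h1 := List.find?_some h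
  have h2 := List.mem_of_find?_eq_some h
  simp at h1 h2
  exact ⟨h2, h1⟩

theorem pvMaxEnd_succ (xs : List Int) (k : ℕ) :
    pvMaxEnd xs (k+1) = if pvPsum xs (k+1) = 0 then k+1
      else (match pvFo xs k (pvPsum xs (k+1)) with | some r => k - r | none => 0) := by
  rw [pvMaxEnd, List.range_succ_eq_map, List.find?_cons]
  by_cases h0 : pvPsum xs (k+1) = 0
  · simp [pvPsum_zero, h0]
  · have hp0 : (pvPsum xs 0 == pvPsum xs (k+1)) = false := by
      simp [pvPsum_zero]
      exact fun h => h0 h.symm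
    rw [hp0]
    rw [List.find?_map]
    have hcomp : ((fun i => pvPsum xs i == pvPsum xs (k+1)) ∘ Nat.succ)
        = (fun i => pvPsum xs (i+1) == pvPsum xs (k+1)) := rfl
    rw [hcomp]
    rw [if_neg h0]
    show (match Option.map Nat.succ (pvFo xs k (pvPsum xs (k+1))) with
          | some i => k + 1 - i | none => 0) = _
    cases hfo : pvFo xs k (pvPsum xs (k+1)) <;> simp

theorem pvBU_zero (xs : List Int) : pvBU xs 0 = 0 := by
  simp [pvBU, pvMaxEnd, List.range_zero]

theorem pvBU_succ (xs : List Int) (k : ℕ) :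
    pvBU xs (k+1) = max (pvBU xs k) (pvMaxEnd xs (k+1)) := by
  simp [pvBU, List.range_succ]
theorem pvFind_range_exists {p : ℕ → Bool} {j i : ℕ} (hi : i < j) (hp : p i = true) :
    ∃ i₀, (List.range j).find? p = some i₀ ∧ i₀ ≤ i ∧ p i₀ = true := by
  induction j with
  | zero => omega
  | succ j ih =>
    rw [List.range_succ, List.find?_append]
    by_cases hij : i < j
    · obtain ⟨i₀, h1, h2, h3⟩ := ih hij
      exact ⟨i₀, by rw [h1]; rfl, h2, h3⟩
    · have : i = j := by omega
      subst this
      cases hfind : (List.range i).find? p with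
      | some i₀ =>
        have h3 := List.find?_some hfind
        have h2 := List.mem_of_find?_eq_some hfind
        simp at h2
        exact ⟨i₀, rfl, by omega, h3⟩
      | none => exact ⟨i, by simp [List.find?, hp], le_refl _, hp⟩

theorem pvFoldl_max_le {β : Type} {l : List β} {f : β → ℕ} {b c : ℕ}
    (hb : b ≤ c) (h : ∀ x ∈ l, f x ≤ c) :
    l.foldl (fun a x => max a (f x)) b ≤ c := by
  induction l generalizing b with
  | nil => exact hb
  | cons x t ih =>
    simp only [List.foldl_cons]
    exact ih (max_le hb (h x (by simp))) (fun y hy => h y (by simp [hy]))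

theorem pvFoldl_max_absorb {β : Type} (l : List β) (f : β → ℕ) (b : ℕ) :
    l.foldl (fun a x => max a (f x)) b = max b (l.foldl (fun a x => max a (f x)) 0) := by
  induction l generalizing b with
  | nil => simp
  | cons x t ih =>
    simp only [List.foldl_cons]
    rw [ih (max b (f x)), ih (max 0 (f x))]
    omega

theorem pvFoldl_max_eq_sup (n : ℕ) (f : ℕ → ℕ) :
    (List.range n).foldl (fun a x => max a (f x)) 0 = (Finset.range n).sup f := by
  induction n with
  | zero => simp
  | succ n ih =>
    rw [List.range_succ, List.foldl_append, Finset.range_add_one, Finset.sup_insert]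
    simp only [List.foldl_cons, List.foldl_nil]
    rw [pvFoldl_max_absorb, ih]
    show ((Finset.range n).sup f) ⊔ (f n) = f n ⊔ (Finset.range n).sup f
    exact sup_comm _ _

theorem pvBU_eq_pvZW (xs : List Int) : pvBU xs xs.length = pvZW xs := by
  apply le_antisymm
  · apply pvFoldl_max_le (Nat.zero_le _)
    intro j hj
    simp at hj
    cases hfind : (List.range j).find? (fun i => pvPsum xs i == pvPsum xs j) with
    | none =>
      have hval : pvMaxEnd xs j = 0 := by unfold pvMaxEnd; rw [hfind]
      rw [hval]
      exact Nat.zero_le _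
    | some i =>
      have hval : pvMaxEnd xs j = j - i := by unfold pvMaxEnd; rw [hfind]
      rw [hval]
      have h1 := List.find?_some hfind
      have h2 := List.mem_of_find?_eq_some hfind
      simp at h1 h2
      have hmem : ((i, j) : ℕ × ℕ) ∈ (Finset.range (xs.length+1)) ×ˢ (Finset.range (xs.length+1)) := by
        simp [Finset.mem_product]; omega
      have hle := Finset.le_sup (f := fun p : ℕ × ℕ =>
        if p.1 < p.2 ∧ pvPsum xs p.1 = pvPsum xs p.2 then p.2 - p.1 else 0) hmem
      simp only at hle
      rw [if_pos ⟨h2, h1⟩] at hle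
      exact hle
  · apply Finset.sup_le
    intro p hp
    simp [Finset.mem_product] at hp
    split_ifs with hcond
    · obtain ⟨hij, hsum⟩ := hcond
      have hple : pvMaxEnd xs p.2 ≤ pvBU xs xs.length := by
        have hmem : p.2 ∈ List.range (xs.length + 1) := by simp; omega
        exact (PySem.List.le_foldl_max_nat (List.range (xs.length+1)) (pvMaxEnd xs) 0).2 _ hmem
      refine le_trans ?_ hple
      obtain ⟨i₀, h1, h2, h3⟩ := pvFind_range_exists (p := fun i => pvPsum xs i == pvPsum xs p.2) hij (by simp [hsum])
      have hval : pvMaxEnd xs p.2 = p.2 - i₀ := by unfold pvMaxEnd; rw [h1]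
      rw [hval]
      omega
    · exact Nat.zero_le _
theorem pvFo_none (xs : List Int) (k : ℕ) (s : Int) (h : pvFo xs k s = none) :
    ∀ i, i < k → pvPsum xs (i+1) ≠ s := by
  intro i hi hcontra
  have := List.find?_eq_none.mp h i (by simp [hi])
  simp at this
  exact this hcontra

def pvStepA (xs : List Int) (s : Int × Int × PySem.Dict Int Int) (r : ℕ) :
    Int × Int × PySem.Dict Int Int :=
  let tot := s.2.1 + xs.getD r 0
  let mxr := if xs.getD r 0 = 0 then max s.1 1 else s.1
  let mxr := if tot = 0 then max mxr ((r : ℤ) + 1) else mxr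
  match s.2.2.get? tot with
  | some r0 => (max mxr ((r : ℤ) - r0), tot, s.2.2)
  | none => (mxr, tot, s.2.2.insert tot (r : ℤ))

theorem pvScanA (xs : List Int) (k : ℕ) (hk : k ≤ xs.length) :
    ∃ d, (List.range k).foldl (pvStepA xs) (0, 0, PySem.Dict.empty)
        = (((pvBU xs k : ℕ) : ℤ), pvPsum xs k, d)
      ∧ ∀ s, d.get? s = (pvFo xs k s).map (fun r => (r : ℤ)) := by
  induction k with
  | zero =>
    refine ⟨PySem.Dict.empty, ?_, ?_⟩
    · simp [pvBU_zero, pvPsum_zero]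
    · intro s; simp [pvFo_zero, PySem.Dict.get?_empty]
  | succ k ih =>
    obtain ⟨d, heq, hget⟩ := ih (by omega)
    have hklen : k < xs.length := by omega
    rw [List.range_succ, List.foldl_append, heq, List.foldl_cons, List.foldl_nil]
    have htot : pvPsum xs k + xs.getD k 0 = pvPsum xs (k+1) := (pvPsum_succ xs k hklen).symm
    rw [pvStepA]
    simp only [htot]
    rw [pvBU_succ, pvMaxEnd_succ]
    by_cases h0 : pvPsum xs (k+1) = 0
    · rw [if_pos h0]
      cases hfo : pvFo xs k 0 with
      | some r =>
        have hr := pvFo_some xs k 0 r hfo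
        have hd : d.get? (pvPsum xs (k+1)) = some ((r : ℕ) : ℤ) := by rw [h0, hget, hfo]; rfl
        rw [hd]
        refine ⟨d, ?_, ?_⟩
        · simp only [Prod.mk.injEq, and_true, true_and, and_self]
          rw [h0]
          split_ifs <;> push_cast <;> omega
        · intro s
          rw [hget s, pvFo_succ]
          cases hfos : pvFo xs k s with
          | some r' => rfl
          | none =>
            have hne : ¬ (pvPsum xs (k+1) = s) := by
              intro hc; rw [← hc, h0] at hfos; rw [hfos] at hfo; simp at hfo
            simp [hne]
      | none =>
        have hd : d.get? (pvPsum xs (k+1)) = none := by rw [h0, hget, hfo]; rfl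
        rw [hd]
        refine ⟨d.insert (pvPsum xs (k+1)) (k : ℤ), ?_, ?_⟩
        · simp only [Prod.mk.injEq, and_true, true_and, and_self]
          rw [h0]
          split_ifs <;> push_cast <;> omega
        · intro s
          rw [PySem.Dict.get?_insert, hget s, pvFo_succ]
          by_cases hs : s = pvPsum xs (k+1)
          · subst hs
            rw [if_pos rfl, h0, hfo]
            simp
          · rw [if_neg hs]
            cases hfos : pvFo xs k s with
            | some r' => rfl
            | none => simp [Ne.symm hs]
    · rw [if_neg h0]
      cases hfo : pvFo xs k (pvPsum xs (k+1)) with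
      | some r =>
        have hr := pvFo_some xs k _ r hfo
        have hd : d.get? (pvPsum xs (k+1)) = some ((r : ℕ) : ℤ) := by rw [hget, hfo]; rfl
        rw [hd]
        refine ⟨d, ?_, ?_⟩
        · simp only [Prod.mk.injEq, and_true, true_and, and_self]
          rw [if_neg h0]
          split_ifs <;> push_cast <;> omega
        · intro s
          rw [hget s, pvFo_succ]
          cases hfos : pvFo xs k s with
          | some r' => rfl
          | none =>
            have hne : ¬ (pvPsum xs (k+1) = s) := by
              intro hc; rw [hc] at hfo; rw [hfo] at hfos; simp at hfos
            simp [hne]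
      | none =>
        have hxk : ¬ (xs.getD k 0 = 0) := by
          intro hz
          have hps : pvPsum xs (k+1) = pvPsum xs k := by
            rw [pvPsum_succ xs k hklen, hz, add_zero]
          rcases Nat.eq_zero_or_pos k with hk0 | hkpos
          · subst hk0
            rw [hps, pvPsum_zero] at h0
            exact h0 rfl
          · have hnone := pvFo_none xs k _ hfo (k-1) (by omega)
            apply hnone
            have hkk : k - 1 + 1 = k := by omega
            rw [hkk, ← hps]
        have hd : d.get? (pvPsum xs (k+1)) = none := by rw [hget, hfo]; rfl
        rw [hd]
        refine ⟨d.insert (pvPsum xs (k+1)) (k : ℤ), ?_, ?_⟩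
        · simp only [Prod.mk.injEq, and_true, true_and, and_self]
          rw [if_neg hxk, if_neg h0]
          push_cast; omega
        · intro s
          rw [PySem.Dict.get?_insert, hget s, pvFo_succ]
          by_cases hs : s = pvPsum xs (k+1)
          · subst hs
            rw [if_pos rfl, hfo]
            simp
          · rw [if_neg hs]
            cases hfos : pvFo xs k s with
            | some r' => rfl
            | none => simp [Ne.symm hs]

theorem pvFoldl_set_partial (f : Int → ℕ → Int) (t0 : List Int) (k : ℕ) (hk : k ≤ t0.length) :
    (List.range k).foldl (fun t r => t.set r (f (t.getD r 0) r)) t0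
      = ((List.range k).map (fun r => f (t0.getD r 0) r)) ++ t0.drop k := by
  induction k with
  | zero => simp
  | succ k ih =>
    rw [List.range_succ, List.foldl_append, ih (by omega), List.foldl_cons, List.foldl_nil,
      List.map_append]
    have hlen : ((List.range k).map (fun r => f (t0.getD r 0) r)).length = k := by simp
    have hget : (((List.range k).map (fun r => f (t0.getD r 0) r)) ++ t0.drop k).getD k 0
        = t0.getD k 0 := by
      rw [List.getD_eq_getElem?_getD, List.getElem?_append_right (by rw [hlen]), hlen,
        Nat.sub_self, List.getElem?_drop, Nat.add_zero, ← List.getD_eq_getElem?_getD]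
    rw [hget]
    rw [List.drop_eq_getElem_cons (by omega : k < t0.length)]
    rw [List.set_append_right _ _ (by rw [hlen] : ((List.range k).map (fun r => f (t0.getD r 0) r)).length ≤ k)]
    rw [hlen, Nat.sub_self, List.set_cons_zero]
    have hgd : t0.getD k 0 = t0[k] := List.getD_eq_getElem t0 0 (by omega)
    simp [hgd]
def pvRowline (mat : List (List Int)) (a b : ℕ) : List Int :=
  (List.range mat.length).map (fun r => ∑ c ∈ Finset.Ico a b, pvCell mat r c)

theorem length_pvRowline (mat : List (List Int)) (a b : ℕ) :
    (pvRowline mat a b).length = mat.length := by simp [pvRowline]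

theorem pvRowline_getD (mat : List (List Int)) (a b r : ℕ) (h : r < mat.length) :
    (pvRowline mat a b).getD r 0 = ∑ c ∈ Finset.Ico a b, pvCell mat r c := by
  rw [pvRowline, List.getD_eq_getElem?_getD, List.getElem?_map, List.getElem?_range h]
  rfl

theorem pvRowline_self (mat : List (List Int)) (a : ℕ) :
    pvRowline mat a a = List.replicate mat.length 0 := by
  simp [pvRowline]

theorem pvReplicate_drop_getD (xs : List Int) (k : ℕ) (hk : k < xs.length) :
    (List.replicate k (0:Int) ++ xs.drop k).getD k 0 = xs.getD k 0 := by
  rw [List.getD_eq_getElem?_getD, List.getElem?_append_right (by simp), List.length_replicate,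
    Nat.sub_self, List.getElem?_drop, Nat.add_zero, ← List.getD_eq_getElem?_getD]

theorem pvReplicate_drop_set (xs : List Int) (k : ℕ) (hk : k < xs.length) :
    (List.replicate k (0:Int) ++ xs.drop k).set k 0
      = List.replicate (k+1) (0:Int) ++ xs.drop (k+1) := by
  rw [List.set_append_right _ _ (by simp), List.length_replicate, Nat.sub_self]
  rw [List.drop_eq_getElem_cons hk, List.set_cons_zero]
  rw [List.replicate_succ', List.append_assoc]
  rfl

def pvStepA4 (cond : Prop) [inst : Decidable cond]
    (p : Int × Int × PySem.Dict Int Int × List Int) (r : ℕ) :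
    Int × Int × PySem.Dict Int Int × List Int :=
  let t := p.2.2.2.getD r 0
  let tot := p.2.1 + t
  let mxr := if t = 0 then max p.1 1 else p.1
  let mxr := if tot = 0 then max mxr ((r : ℤ) + 1) else mxr
  match p.2.2.1.get? tot with
  | some r0 => (max mxr ((r : ℤ) - r0), tot, p.2.2.1, if cond then p.2.2.2.set r 0 else p.2.2.2)
  | none => (mxr, tot, p.2.2.1.insert tot (r : ℤ), if cond then p.2.2.2.set r 0 else p.2.2.2)

theorem pvScanA4_false (xs : List Int) (cond : Prop) [Decidable cond] (hc : ¬ cond)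
    (k : ℕ) (s0 : Int × Int × PySem.Dict Int Int) :
    (List.range k).foldl (pvStepA4 cond) (s0.1, s0.2.1, s0.2.2, xs)
      = (((List.range k).foldl (pvStepA xs) s0).1,
         ((List.range k).foldl (pvStepA xs) s0).2.1,
         ((List.range k).foldl (pvStepA xs) s0).2.2, xs) := by
  induction k with
  | zero => simp
  | succ k ih =>
    rw [List.range_succ, List.foldl_append, List.foldl_append, ih,
      List.foldl_cons, List.foldl_nil, List.foldl_cons, List.foldl_nil]
    set s := (List.range k).foldl (pvStepA xs) s0 with hs
    rw [pvStepA4, pvStepA]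
    cases hm : s.2.2.get? (s.2.1 + xs.getD k 0) <;> simp [hm, hc]

theorem pvScanA4_true (xs : List Int) (cond : Prop) [Decidable cond] (hc : cond)
    (k : ℕ) (hk : k ≤ xs.length) (s0 : Int × Int × PySem.Dict Int Int) :
    (List.range k).foldl (pvStepA4 cond) (s0.1, s0.2.1, s0.2.2, xs)
      = (((List.range k).foldl (pvStepA xs) s0).1,
         ((List.range k).foldl (pvStepA xs) s0).2.1,
         ((List.range k).foldl (pvStepA xs) s0).2.2,
         List.replicate k 0 ++ xs.drop k) := by
  induction k with
  | zero => simp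
  | succ k ih =>
    have hklen : k < xs.length := by omega
    rw [List.range_succ, List.foldl_append, List.foldl_append, ih (by omega),
      List.foldl_cons, List.foldl_nil, List.foldl_cons, List.foldl_nil]
    set s := (List.range k).foldl (pvStepA xs) s0 with hs
    rw [pvStepA4, pvStepA]
    rw [pvReplicate_drop_getD xs k hklen]
    cases hm : s.2.2.get? (s.2.1 + xs.getD k 0) <;>
      simp [hm, hc, pvReplicate_drop_set xs k hklen]
def pvAREA (mat : List (List Int)) : ℕ :=
  ((Finset.range (mat.length+1) ×ˢ Finset.range (mat.length+1)) ×ˢ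
   (Finset.range ((mat.getD 0 []).length+1) ×ˢ Finset.range ((mat.getD 0 []).length+1))).sup
    (fun q => if q.1.1 < q.1.2 ∧ q.2.1 < q.2.2 ∧
        (∑ r ∈ Finset.Ico q.1.1 q.1.2, ∑ c ∈ Finset.Ico q.2.1 q.2.2, pvCell mat r c) = 0
      then (q.1.2 - q.1.1) * (q.2.2 - q.2.1) else 0)

def pvNA (mat : List (List Int)) : ℕ :=
  (List.range (mat.getD 0 []).length).foldl (fun acc a =>
    (List.range ((mat.getD 0 []).length - a)).foldl
      (fun acc t => max acc ((t+1) * pvZW (pvRowline mat a (a+t+1)))) acc) 0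

theorem pvPsum_rowline (mat : List (List Int)) (a b i : ℕ) (hi : i ≤ mat.length) :
    pvPsum (pvRowline mat a b) i
      = ∑ r ∈ Finset.range i, ∑ c ∈ Finset.Ico a b, pvCell mat r c := by
  induction i with
  | zero => simp [pvPsum_zero]
  | succ i ih =>
    rw [pvPsum_succ _ _ (by rw [length_pvRowline]; omega), ih (by omega),
      Finset.sum_range_succ, pvRowline_getD mat a b i (by omega)]

theorem pvWin_rowline (mat : List (List Int)) (a b i j : ℕ) (hij : i ≤ j) (hj : j ≤ mat.length) :
    (pvPsum (pvRowline mat a b) i = pvPsum (pvRowline mat a b) j)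
      ↔ (∑ r ∈ Finset.Ico i j, ∑ c ∈ Finset.Ico a b, pvCell mat r c) = 0 := by
  rw [pvPsum_rowline mat a b i (by omega), pvPsum_rowline mat a b j hj,
    Finset.sum_Ico_eq_sub _ hij, sub_eq_zero, eq_comm]

theorem pvNA_sup (mat : List (List Int)) :
    pvNA mat = (Finset.range (mat.getD 0 []).length).sup (fun a =>
      (Finset.range ((mat.getD 0 []).length - a)).sup
        (fun t => (t+1) * pvZW (pvRowline mat a (a+t+1)))) := by
  unfold pvNA
  rw [PySem.List.foldl_congr_mem _ _
    (fun acc a => max acc ((Finset.range ((mat.getD 0 []).length - a)).sup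
      (fun t => (t+1) * pvZW (pvRowline mat a (a+t+1))))) 0
    (by
      intro acc a _
      rw [pvFoldl_max_absorb]
      congr 1
      exact pvFoldl_max_eq_sup _ _)]
  exact pvFoldl_max_eq_sup _ _

theorem pvNA_eq_AREA (mat : List (List Int)) : pvNA mat = pvAREA mat := by
  apply le_antisymm
  · rw [pvNA_sup]
    apply Finset.sup_le
    intro a ha
    apply Finset.sup_le
    intro t ht
    simp only [Finset.mem_range] at ha ht
    rw [pvZW]
    obtain ⟨p, hp, hzw⟩ := Finset.exists_mem_eq_sup
      ((Finset.range ((pvRowline mat a (a+t+1)).length+1)) ×ˢ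
       (Finset.range ((pvRowline mat a (a+t+1)).length+1)))
      ⟨(0,0), by simp⟩
      (fun p => if p.1 < p.2 ∧ pvPsum (pvRowline mat a (a+t+1)) p.1
          = pvPsum (pvRowline mat a (a+t+1)) p.2 then p.2 - p.1 else 0)
    rw [hzw]
    by_cases hcond : p.1 < p.2 ∧ pvPsum (pvRowline mat a (a+t+1)) p.1
        = pvPsum (pvRowline mat a (a+t+1)) p.2
    · rw [if_pos hcond]
      simp only [Finset.mem_product, Finset.mem_range, length_pvRowline] at hp
      have hmem : (((p.1, p.2), (a, a+t+1)) :
          (ℕ × ℕ) × (ℕ × ℕ)) ∈ ((Finset.range (mat.length+1) ×ˢ Finset.range (mat.length+1)) ×ˢ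
          (Finset.range ((mat.getD 0 []).length+1) ×ˢ Finset.range ((mat.getD 0 []).length+1))) := by
        simp only [Finset.mem_product, Finset.mem_range]
        refine ⟨⟨?_, ?_⟩, ?_, ?_⟩ <;> omega
      refine le_trans (le_of_eq ?_) (Finset.le_sup hmem)
      dsimp only
      rw [if_pos]
      · have h1 : a + t + 1 - a = t + 1 := by omega
        rw [h1, mul_comm]
      · refine ⟨hcond.1, by omega, ?_⟩
        exact (pvWin_rowline mat a (a+t+1) p.1 p.2 (by omega) (by omega)).mp hcond.2
    · rw [if_neg hcond]
      simp
  · apply Finset.sup_le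
    intro q hq
    simp only [Finset.mem_product, Finset.mem_range] at hq
    split_ifs with hcond
    · obtain ⟨hij, hab, hsum⟩ := hcond
      rw [pvNA_sup]
      have hb : q.2.2 ≤ (mat.getD 0 []).length := by omega
      refine le_trans ?_ (Finset.le_sup (Finset.mem_range.mpr (show q.2.1 < (mat.getD 0 []).length by omega)))
      refine le_trans ?_ (Finset.le_sup (f := fun t => (t+1) * pvZW (pvRowline mat q.2.1 (q.2.1+t+1)))
        (Finset.mem_range.mpr (show q.2.2 - q.2.1 - 1 < (mat.getD 0 []).length - q.2.1 by omega)))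
      have h1 : q.2.1 + (q.2.2 - q.2.1 - 1) + 1 = q.2.2 := by omega
      have h2 : q.2.2 - q.2.1 - 1 + 1 = q.2.2 - q.2.1 := by omega
      dsimp only
      rw [h1, h2, mul_comm]
      apply mul_le_mul_left'
      rw [pvZW]
      have hmem : ((q.1.1, q.1.2) : ℕ × ℕ) ∈
          ((Finset.range ((pvRowline mat q.2.1 q.2.2).length+1)) ×ˢ
           (Finset.range ((pvRowline mat q.2.1 q.2.2).length+1))) := by
        simp only [Finset.mem_product, Finset.mem_range, length_pvRowline]
        omega
      refine le_trans (le_of_eq ?_) (Finset.le_sup hmem)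
      dsimp only
      rw [if_pos]
      refine ⟨hij, ?_⟩
      exact (pvWin_rowline mat q.2.1 q.2.2 q.1.1 q.1.2 (by omega) (by omega)).mpr hsum
    · exact Nat.zero_le _
theorem pvVal_ite (x : Int) : (if x = 1 then x else -1) = pvVal x := by
  unfold pvVal
  split_ifs with h
  · exact h
  · rfl

theorem pvA_acc_eq (mat : List (List Int)) (a b : ℕ) (hab : a ≤ b) :
    (PySem.List.pyRange 0 (mat.length : ℤ) 1).foldl (pvA_inner1Step mat (b : ℤ))
      (pvRowline mat a b) = pvRowline mat a (b+1) := by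
  rw [PySem.List.pyRange_zero_natCast, List.foldl_map]
  rw [PySem.List.foldl_congr_mem _ _
    (fun t (r : ℕ) => t.set r (t.getD r 0 + pvCell mat r b)) _
    (by
      intro t r _
      simp only [pvA_inner1Step, PySem.List.pyGetD_natCast, Int.toNat_natCast]
      rw [pvVal_ite]
      rfl)]
  rw [pvFoldl_set_partial (fun old r => old + pvCell mat r b) _ _ (by rw [length_pvRowline])]
  rw [show (pvRowline mat a b).drop mat.length = [] from by
    rw [← length_pvRowline mat a b]; exact List.drop_length]
  rw [List.append_nil]
  conv_rhs => unfold pvRowline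
  apply List.map_congr_left
  intro r hr
  rw [List.mem_range] at hr
  rw [pvRowline_getD mat a b r hr, ← Finset.sum_Ico_succ_top hab]

theorem pvA_scan_eq (xs : List Int) (col_sz col_right : Int) :
    ∃ d, (PySem.List.pyRange 0 (xs.length : ℤ) 1).foldl (pvA_inner2Step col_sz col_right)
      (0, 0, PySem.Dict.empty, xs)
    = (((pvBU xs xs.length : ℕ) : ℤ), pvPsum xs xs.length, d,
       if col_right = col_sz - 1 then List.replicate xs.length 0 else xs) := by
  rw [PySem.List.pyRange_zero_natCast, List.foldl_map]
  rw [PySem.List.foldl_congr_mem _ _ (pvStepA4 (col_right = col_sz - 1)) _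
    (by
      intro s r _
      simp only [pvA_inner2Step, pvStepA4, PySem.List.pyGetD_natCast, Int.toNat_natCast])]
  obtain ⟨d, heq, hget⟩ := pvScanA xs xs.length le_rfl
  by_cases hc : col_right = col_sz - 1
  · have h4 := pvScanA4_true xs (col_right = col_sz - 1) hc xs.length le_rfl
      (0, 0, PySem.Dict.empty)
    refine ⟨d, ?_⟩
    rw [if_pos hc]
    simpa [heq, List.drop_length] using h4
  · have h4 := pvScanA4_false xs (col_right = col_sz - 1) hc xs.length
      (0, 0, PySem.Dict.empty)
    refine ⟨d, ?_⟩
    rw [if_neg hc]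
    simpa [heq] using h4

theorem pvA_pair_eq (mat : List (List Int)) (a t : ℕ)
    (h : a + t < (mat.getD 0 []).length) (m0 : ℕ) :
    pvA_pairStep mat (mat.length : ℤ) (((mat.getD 0 []).length : ℕ) : ℤ) (a : ℤ)
      (((m0 : ℕ) : ℤ), pvRowline mat a (a+t), PySem.Dict.empty) (((a+t : ℕ) : ℤ))
    = (((max m0 ((t+1) * pvZW (pvRowline mat a (a+t+1))) : ℕ) : ℤ),
       (if a+t = (mat.getD 0 []).length - 1 then List.replicate mat.length 0
        else pvRowline mat a (a+t+1)),
       PySem.Dict.empty) := by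
  unfold pvA_pairStep
  try dsimp only
  rw [pvA_acc_eq mat a (a+t) (by omega)]
  have hxl : (pvRowline mat a (a+t+1)).length = mat.length := length_pvRowline mat a (a+t+1)
  obtain ⟨d, hscan⟩ := pvA_scan_eq (pvRowline mat a (a+t+1))
    (((mat.getD 0 []).length : ℕ) : ℤ) (((a+t : ℕ) : ℤ))
  rw [hxl] at hscan
  rw [hscan]
  have hcond : ((((a+t : ℕ) : ℤ)) = (((mat.getD 0 []).length : ℕ) : ℤ) - 1)
      ↔ (a + t = (mat.getD 0 []).length - 1) := by omega
  have hwidth : (((a+t : ℕ) : ℤ)) - ((a : ℕ) : ℤ) + 1 = ((t : ℕ) : ℤ) + 1 := by push_cast; ring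
  simp only [Prod.mk.injEq, and_true]
  refine ⟨?_, ?_⟩
  · rw [hwidth,
      show pvBU (pvRowline mat a (a+t+1)) mat.length = pvZW (pvRowline mat a (a+t+1)) from by
        rw [← hxl]; exact pvBU_eq_pvZW _]
    have hm : (((pvZW (pvRowline mat a (a+t+1)) : ℕ) : ℤ)) * (((t : ℕ) : ℤ) + 1)
        = (((t+1) * pvZW (pvRowline mat a (a+t+1)) : ℕ) : ℤ) := by push_cast; ring
    rw [hm, ← Nat.cast_max]
  · by_cases hc : a + t = (mat.getD 0 []).length - 1
    · rw [if_pos (hcond.mpr hc), if_pos hc]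
    · rw [if_neg (fun hx => hc (hcond.mp hx)), if_neg hc]

theorem pvA_col_eq (mat : List (List Int)) (a : ℕ) (ha : a < (mat.getD 0 []).length) (m0 : ℕ) :
    (PySem.List.pyRange ((a : ℕ) : ℤ) (((mat.getD 0 []).length : ℕ) : ℤ) 1).foldl
      (pvA_pairStep mat (mat.length : ℤ) (((mat.getD 0 []).length : ℕ) : ℤ) ((a : ℕ) : ℤ))
      (((m0 : ℕ) : ℤ), List.replicate mat.length 0, PySem.Dict.empty)
    = (((((List.range ((mat.getD 0 []).length - a)).foldl
          (fun acc t => max acc ((t+1) * pvZW (pvRowline mat a (a+t+1)))) m0) : ℕ) : ℤ),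
       List.replicate mat.length 0, PySem.Dict.empty) := by
  rw [PySem.List.pyRange_one,
    show ((((mat.getD 0 []).length : ℕ) : ℤ) - ((a : ℕ) : ℤ)).toNat
      = (mat.getD 0 []).length - a from by omega,
    List.foldl_map]
  have hgen : ∀ j, j ≤ (mat.getD 0 []).length - a →
      (List.range j).foldl
        (fun st (k : ℕ) => pvA_pairStep mat (mat.length : ℤ)
          (((mat.getD 0 []).length : ℕ) : ℤ) ((a : ℕ) : ℤ) st (((a : ℕ) : ℤ) + ((k : ℕ) : ℤ)))
        (((m0 : ℕ) : ℤ), List.replicate mat.length 0, PySem.Dict.empty)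
      = (((((List.range j).foldl
            (fun acc t => max acc ((t+1) * pvZW (pvRowline mat a (a+t+1)))) m0) : ℕ) : ℤ),
         (if a + j = (mat.getD 0 []).length then List.replicate mat.length 0
          else pvRowline mat a (a+j)),
         PySem.Dict.empty) := by
    intro j
    induction j with
    | zero =>
      intro _
      simp only [List.range_zero, List.foldl_nil]
      rw [if_neg (show ¬(a + 0 = (mat.getD 0 []).length) from by omega), Nat.add_zero,
        pvRowline_self]
    | succ j ih =>
      intro hj
      rw [List.range_succ, List.foldl_append, List.foldl_append, ih (by omega),
        List.foldl_cons, List.foldl_nil, List.foldl_cons, List.foldl_nil]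
      try dsimp only
      rw [if_neg (show ¬(a + j = (mat.getD 0 []).length) from by omega)]
      rw [show ((a : ℕ) : ℤ) + ((j : ℕ) : ℤ) = (((a + j : ℕ) : ℕ) : ℤ) from by push_cast; ring]
      rw [pvA_pair_eq mat a j (by omega)]
      have hc2 : (a + j = (mat.getD 0 []).length - 1) ↔ (a + (j+1) = (mat.getD 0 []).length) := by
        omega
      simp only [Prod.mk.injEq, and_true, true_and]
      refine ?_
      by_cases hc : a + (j + 1) = (mat.getD 0 []).length
      · rw [if_pos (hc2.mpr hc), if_pos hc]
      · rw [if_neg (fun hx => hc (hc2.mp hx)), if_neg hc,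
          show a + (j+1) = a + j + 1 from by omega]
  have hfin := hgen ((mat.getD 0 []).length - a) le_rfl
  rw [hfin, if_pos (show a + ((mat.getD 0 []).length - a) = (mat.getD 0 []).length from by omega)]

theorem pvPortA_eq (mat : List (List Int)) (n m : Int) :
    maximumArea mat n m = ((pvNA mat : ℕ) : ℤ) := by
  unfold maximumArea
  try dsimp only
  simp only [PySem.List.pyGetD_ofNat']
  rw [PySem.List.pyRange_zero_natCast ((mat.getD 0 []).length),
    PySem.List.pyRange_zero_natCast (mat.length), List.map_map]
  rw [show (List.range mat.length).map ((fun _ => (0:ℤ)) ∘ (fun k : ℕ => (k : ℤ)))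
      = List.replicate mat.length 0 from by
    rw [show ((fun _ => (0:ℤ)) ∘ (fun k : ℕ => (k : ℤ))) = (fun _ : ℕ => (0:ℤ)) from rfl,
      List.map_const', List.length_range]]
  rw [List.foldl_map]
  have hout : ∀ (as : List ℕ), (∀ x ∈ as, x < (mat.getD 0 []).length) → ∀ (m0 : ℕ),
      as.foldl (fun st (a : ℕ) =>
        (PySem.List.pyRange ((a : ℕ) : ℤ) (((mat.getD 0 []).length : ℕ) : ℤ) 1).foldl
          (pvA_pairStep mat (mat.length : ℤ) (((mat.getD 0 []).length : ℕ) : ℤ) ((a : ℕ) : ℤ)) st)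
        (((m0 : ℕ) : ℤ), List.replicate mat.length 0, PySem.Dict.empty)
      = (((as.foldl (fun acc a => (List.range ((mat.getD 0 []).length - a)).foldl
            (fun acc t => max acc ((t+1) * pvZW (pvRowline mat a (a+t+1)))) acc) m0 : ℕ) : ℤ),
         List.replicate mat.length 0, PySem.Dict.empty) := by
    intro as
    induction as with
    | nil => intro _ m0; simp
    | cons a as ih =>
      intro hmem m0
      rw [List.foldl_cons, List.foldl_cons]
      try dsimp only
      rw [pvA_col_eq mat a (hmem a (by simp)) m0]
      exact ih (fun x hx => hmem x (by simp [hx])) _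
  have ho := hout (List.range (mat.getD 0 []).length) (by intro x hx; simpa using hx) 0
  simp only [Nat.cast_zero] at ho
  rw [ho]
  rfl

-- ===== B-side proof: characterize the prefix table, then the quadruple scan =====

def pvS (mat : List (List Int)) (i j : ℕ) : Int :=
  ∑ r ∈ Finset.range i, ∑ c ∈ Finset.range j, pvCell mat r c

theorem pvS_zero_left (mat : List (List Int)) (j : ℕ) : pvS mat 0 j = 0 := by
  simp [pvS]

theorem pvS_succ_left (mat : List (List Int)) (i j : ℕ) :
    pvS mat (i+1) j = pvS mat i j + ∑ c ∈ Finset.range j, pvCell mat i c := by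
  simp [pvS, Finset.sum_range_succ]

-- the rectangle sum through the four corners of the prefix table
theorem pvRect (mat : List (List Int)) (t b l r : ℕ) (htb : t ≤ b) (hlr : l ≤ r) :
    (∑ rr ∈ Finset.Ico t b, ∑ c ∈ Finset.Ico l r, pvCell mat rr c)
      = pvS mat b r - pvS mat t r - pvS mat b l + pvS mat t l := by
  have hrow : ∀ rr, (∑ c ∈ Finset.Ico l r, pvCell mat rr c)
      = (∑ c ∈ Finset.range r, pvCell mat rr c) - (∑ c ∈ Finset.range l, pvCell mat rr c) := by
    intro rr; rw [Finset.sum_Ico_eq_sub _ hlr]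
  calc (∑ rr ∈ Finset.Ico t b, ∑ c ∈ Finset.Ico l r, pvCell mat rr c)
      = (∑ rr ∈ Finset.Ico t b, ((∑ c ∈ Finset.range r, pvCell mat rr c)
          - (∑ c ∈ Finset.range l, pvCell mat rr c))) := by
        exact Finset.sum_congr rfl (fun rr _ => hrow rr)
    _ = (∑ rr ∈ Finset.Ico t b, ∑ c ∈ Finset.range r, pvCell mat rr c)
          - (∑ rr ∈ Finset.Ico t b, ∑ c ∈ Finset.range l, pvCell mat rr c) := by
        rw [Finset.sum_sub_distrib]
    _ = _ := by
        rw [Finset.sum_Ico_eq_sub _ htb, Finset.sum_Ico_eq_sub _ htb]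
        unfold pvS
        ring

-- one row of the prefix table
theorem pvB_buildRow_eq (mat : List (List Int)) (i : ℕ) :
    pvB_buildRow (((mat.getD 0 []).length : ℕ) : ℤ)
      ((List.range ((mat.getD 0 []).length + 1)).map (fun j => pvS mat i j))
      (mat.getD i [])
    = (List.range ((mat.getD 0 []).length + 1)).map (fun j => pvS mat (i+1) j) := by
  unfold pvB_buildRow
  rw [PySem.List.pyRange_zero_natCast, List.foldl_map]
  have hgen : ∀ k, k ≤ (mat.getD 0 []).length →
      (List.range k).foldl
        (fun s (j : ℕ) => pvB_rowStep (mat.getD i [])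
          ((List.range ((mat.getD 0 []).length + 1)).map (fun j => pvS mat i j)) s ((j : ℕ) : ℤ))
        (0, [0])
      = (∑ c ∈ Finset.range k, pvCell mat i c,
         (List.range (k+1)).map (fun j => pvS mat (i+1) j)) := by
    intro k
    induction k with
    | zero =>
      intro _
      simp [pvS, Finset.sum_range_succ]
    | succ k ih =>
      intro hk
      rw [show List.range (k+1) = List.range k ++ [k] from List.range_succ,
        List.foldl_append, ih (by omega), List.foldl_cons, List.foldl_nil]
      unfold pvB_rowStep
      try dsimp only
      have hrow : PySem.List.pyGetD (mat.getD i []) ((k : ℕ) : ℤ) 0 = (mat.getD i []).getD k 0 :=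
        PySem.List.pyGetD_natCast _ _ _
      have hprev : PySem.List.pyGetD
          ((List.range ((mat.getD 0 []).length + 1)).map (fun j => pvS mat i j))
          (((k : ℕ) : ℤ) + 1) 0 = pvS mat i (k+1) := by
        rw [show ((k : ℕ) : ℤ) + 1 = (((k+1 : ℕ) : ℕ) : ℤ) from by push_cast; ring,
          PySem.List.pyGetD_natCast, PySem.List.getD_map_range _ _ _ _ (by omega)]
      rw [hrow, hprev]
      have hacc : (∑ c ∈ Finset.range k, pvCell mat i c)
          + (if (mat.getD i []).getD k 0 = 1 then 1 else -1)
          = ∑ c ∈ Finset.range (k+1), pvCell mat i c := by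
        rw [Finset.sum_range_succ]
        congr 1
      rw [hacc]
      simp only [Prod.mk.injEq, true_and]
      rw [List.range_succ (n := k+1), List.map_append]
      congr 1
      simp only [List.map_cons, List.map_nil, List.cons.injEq, and_true]
      rw [pvS_succ_left]
  have h := hgen (mat.getD 0 []).length le_rfl
  rw [h]

-- the whole prefix table
theorem pvB_table_eq (mat : List (List Int)) :
    mat.foldl (fun ps row => ps ++ [pvB_buildRow (((mat.getD 0 []).length : ℕ) : ℤ)
        (PySem.List.pyGetD ps (-1) []) row])
      [PySem.List.pyRepeat [0] ((((mat.getD 0 []).length : ℕ) : ℤ) + 1)]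
    = (List.range (mat.length + 1)).map (fun i =>
        (List.range ((mat.getD 0 []).length + 1)).map (fun j => pvS mat i j)) := by
  have htake : ∀ k, k ≤ mat.length →
      (mat.take k).foldl (fun ps row => ps ++ [pvB_buildRow (((mat.getD 0 []).length : ℕ) : ℤ)
          (PySem.List.pyGetD ps (-1) []) row])
        [PySem.List.pyRepeat [0] ((((mat.getD 0 []).length : ℕ) : ℤ) + 1)]
      = (List.range (k + 1)).map (fun i =>
          (List.range ((mat.getD 0 []).length + 1)).map (fun j => pvS mat i j)) := by
    intro k
    induction k with
    | zero =>
      intro _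
      simp only [List.take_zero, List.foldl_nil, List.range_one, List.map_cons, List.map_nil]
      congr 1
      rw [show (((mat.getD 0 []).length : ℕ) : ℤ) + 1 = (((mat.getD 0 []).length + 1 : ℕ) : ℤ)
        from by push_cast; ring, PySem.List.pyRepeat_singleton]
      simp only [Int.toNat_natCast]
      rw [show (fun j => pvS mat 0 j) = (fun _ : ℕ => (0:ℤ)) from funext (pvS_zero_left mat),
        List.map_const', List.length_range]
    | succ k ih =>
      intro hk
      have hkl : k < mat.length := by omega
      rw [List.take_succ, List.getElem?_eq_getElem hkl]
      simp only [Option.toList_some]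
      rw [List.foldl_append, ih (by omega), List.foldl_cons, List.foldl_nil]
      have hlast : PySem.List.pyGetD
          ((List.range (k + 1)).map (fun i =>
            (List.range ((mat.getD 0 []).length + 1)).map (fun j => pvS mat i j))) (-1) []
          = (List.range ((mat.getD 0 []).length + 1)).map (fun j => pvS mat k j) := by
        rw [show List.range (k+1) = List.range k ++ [k] from List.range_succ, List.map_append]
        simp only [List.map_cons, List.map_nil]
        exact PySem.List.pyGetD_neg_one_append_singleton _ _ _
      rw [hlast]
      have hrowk : mat[k] = mat.getD k [] := (List.getD_eq_getElem mat [] hkl).symm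
      rw [hrowk, pvB_buildRow_eq mat k]
      rw [List.range_succ (n := k+1), List.map_append]
      simp
  have h := htake mat.length le_rfl
  rw [List.take_length] at h
  exact h

-- reading the table
theorem pvB_get_eq (mat : List (List Int)) (i j : ℕ)
    (hi : i ≤ mat.length) (hj : j ≤ (mat.getD 0 []).length) :
    pvB_get ((List.range (mat.length + 1)).map (fun i =>
        (List.range ((mat.getD 0 []).length + 1)).map (fun j => pvS mat i j)))
      ((i : ℕ) : ℤ) ((j : ℕ) : ℤ) = pvS mat i j := by
  unfold pvB_get
  simp only [PySem.List.pyGetD_natCast]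
  rw [PySem.List.getD_map_range _ _ _ _ (by omega),
    PySem.List.getD_map_range _ _ _ _ (by omega)]

-- pulling the Nat cast out of an Int-valued fold
theorem pvFoldl_cast_gen (l : List ℕ) (g : ℕ → ℕ → ℕ) (b : ℕ)
    (f : ℤ → ℕ → ℤ) (h : ∀ (b' : ℕ), ∀ x ∈ l, f ((b' : ℕ) : ℤ) x = ((g b' x : ℕ) : ℤ)) :
    l.foldl f ((b : ℕ) : ℤ) = ((l.foldl g b : ℕ) : ℤ) := by
  induction l generalizing b with
  | nil => rfl
  | cons x t ih =>
    rw [List.foldl_cons, List.foldl_cons, h b x (by simp)]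
    exact ih _ (fun b' y hy => h b' y (by simp [hy]))

theorem pvFoldl_cast_gen0 (l : List ℕ) (g : ℕ → ℕ → ℕ)
    (f : ℤ → ℕ → ℤ) (h : ∀ (b' : ℕ), ∀ x ∈ l, f ((b' : ℕ) : ℤ) x = ((g b' x : ℕ) : ℤ)) :
    l.foldl f 0 = ((l.foldl g 0 : ℕ) : ℤ) := by
  have := pvFoldl_cast_gen l g 0 f h
  simpa using this

-- the Nat-level quadruple scan of B
def pvQB (mat : List (List Int)) : ℕ :=
  (List.range mat.length).foldl (fun acc t =>
    (List.range (mat.length - t)).foldl (fun acc k =>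
      (List.range (mat.getD 0 []).length).foldl (fun acc l =>
        (List.range ((mat.getD 0 []).length - l)).foldl (fun acc k2 =>
          if pvS mat (t+1+k) (l+1+k2) - pvS mat t (l+1+k2)
              - pvS mat (t+1+k) l + pvS mat t l = 0
          then max acc ((k+1) * (k2+1)) else acc) acc) acc) acc) 0

theorem pvPortB_eq (mat : List (List Int)) (n m : Int) :
    maximumArea_alt mat n m = ((pvQB mat : ℕ) : ℤ) := by
  unfold maximumArea_alt
  try dsimp only
  simp only [PySem.List.pyGetD_ofNat']
  rw [pvB_table_eq mat]
  set P := (List.range (mat.length + 1)).map (fun i =>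
    (List.range ((mat.getD 0 []).length + 1)).map (fun j => pvS mat i j)) with hP
  set R := mat.length with hR
  set C := (mat.getD 0 []).length with hC
  rw [PySem.List.pyRange_zero_natCast R, List.foldl_map]
  refine pvFoldl_cast_gen0 _ (fun acc t =>
      (List.range (R - t)).foldl (fun acc k =>
        (List.range C).foldl (fun acc l =>
          (List.range (C - l)).foldl (fun acc k2 =>
            if pvS mat (t+1+k) (l+1+k2) - pvS mat t (l+1+k2)
                - pvS mat (t+1+k) l + pvS mat t l = 0
            then max acc ((k+1) * (k2+1)) else acc) acc) acc) acc) _ ?_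
  intro b1 t ht
  rw [List.mem_range] at ht
  rw [PySem.List.pyRange_one (((t : ℕ) : ℤ) + 1) (((R : ℕ) : ℤ) + 1),
    show (((R : ℕ) : ℤ) + 1 - (((t : ℕ) : ℤ) + 1)).toNat = R - t from by omega,
    List.foldl_map]
  refine pvFoldl_cast_gen _ (fun acc k =>
      (List.range C).foldl (fun acc l =>
        (List.range (C - l)).foldl (fun acc k2 =>
          if pvS mat (t+1+k) (l+1+k2) - pvS mat t (l+1+k2)
              - pvS mat (t+1+k) l + pvS mat t l = 0
          then max acc ((k+1) * (k2+1)) else acc) acc) acc) b1 _ ?_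
  intro b2 k hk
  rw [List.mem_range] at hk
  rw [PySem.List.pyRange_zero_natCast C, List.foldl_map]
  refine pvFoldl_cast_gen _ (fun acc l =>
      (List.range (C - l)).foldl (fun acc k2 =>
        if pvS mat (t+1+k) (l+1+k2) - pvS mat t (l+1+k2)
            - pvS mat (t+1+k) l + pvS mat t l = 0
        then max acc ((k+1) * (k2+1)) else acc) acc) b2 _ ?_
  intro b3 l hl
  rw [List.mem_range] at hl
  rw [PySem.List.pyRange_one (((l : ℕ) : ℤ) + 1) (((C : ℕ) : ℤ) + 1),
    show (((C : ℕ) : ℤ) + 1 - (((l : ℕ) : ℤ) + 1)).toNat = C - l from by omega,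
    List.foldl_map]
  refine pvFoldl_cast_gen _ (fun acc k2 =>
      if pvS mat (t+1+k) (l+1+k2) - pvS mat t (l+1+k2)
          - pvS mat (t+1+k) l + pvS mat t l = 0
      then max acc ((k+1) * (k2+1)) else acc) b3 _ ?_
  intro b4 k2 hk2
  dsimp only
  rw [List.mem_range] at hk2
  have e1 : ((t : ℕ) : ℤ) + 1 + ((k : ℕ) : ℤ) = (((t+1+k : ℕ) : ℕ) : ℤ) := by push_cast; ring
  have e2 : ((l : ℕ) : ℤ) + 1 + ((k2 : ℕ) : ℤ) = (((l+1+k2 : ℕ) : ℕ) : ℤ) := by push_cast; ring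
  rw [e1, e2]
  rw [pvB_get_eq mat (t+1+k) (l+1+k2) (by omega) (by omega),
    pvB_get_eq mat t (l+1+k2) (by omega) (by omega),
    pvB_get_eq mat (t+1+k) l (by omega) (by omega),
    pvB_get_eq mat t l (by omega) (by omega)]
  by_cases hcond : pvS mat (t+1+k) (l+1+k2) - pvS mat t (l+1+k2)
      - pvS mat (t+1+k) l + pvS mat t l = 0
  · rw [if_pos hcond, if_pos hcond]
    have harea : ((((t+1+k : ℕ) : ℕ) : ℤ) - ((t : ℕ) : ℤ)) * ((((l+1+k2 : ℕ) : ℕ) : ℤ) - ((l : ℕ) : ℤ))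
        = (((k+1) * (k2+1) : ℕ) : ℤ) := by push_cast; ring
    rw [harea]
    by_cases hgt : (((k+1) * (k2+1) : ℕ) : ℤ) > ((b4 : ℕ) : ℤ)
    · rw [if_pos hgt]
      have : max b4 ((k+1) * (k2+1)) = (k+1) * (k2+1) := by omega
      rw [this]
    · rw [if_neg hgt]
      have : max b4 ((k+1) * (k2+1)) = b4 := by omega
      rw [this]
  · rw [if_neg hcond, if_neg hcond]

-- pvQB as a nested sup, then equal to pvAREA
theorem pvQB_sup (mat : List (List Int)) :
    pvQB mat = (Finset.range mat.length).sup (fun t =>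
      (Finset.range (mat.length - t)).sup (fun k =>
        (Finset.range (mat.getD 0 []).length).sup (fun l =>
          (Finset.range ((mat.getD 0 []).length - l)).sup (fun k2 =>
            if pvS mat (t+1+k) (l+1+k2) - pvS mat t (l+1+k2)
                - pvS mat (t+1+k) l + pvS mat t l = 0
            then (k+1) * (k2+1) else 0)))) := by
  unfold pvQB
  have hstep : ∀ (t k l : ℕ) (acc k2 : ℕ),
      (if pvS mat (t+1+k) (l+1+k2) - pvS mat t (l+1+k2)
          - pvS mat (t+1+k) l + pvS mat t l = 0
       then max acc ((k+1) * (k2+1)) else acc)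
      = max acc (if pvS mat (t+1+k) (l+1+k2) - pvS mat t (l+1+k2)
          - pvS mat (t+1+k) l + pvS mat t l = 0 then (k+1) * (k2+1) else 0) := by
    intro t k l acc k2
    split_ifs <;> omega
  rw [PySem.List.foldl_congr_mem _ _ (fun acc t => max acc
      ((Finset.range (mat.length - t)).sup (fun k =>
        (Finset.range (mat.getD 0 []).length).sup (fun l =>
          (Finset.range ((mat.getD 0 []).length - l)).sup (fun k2 =>
            if pvS mat (t+1+k) (l+1+k2) - pvS mat t (l+1+k2)
                - pvS mat (t+1+k) l + pvS mat t l = 0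
            then (k+1) * (k2+1) else 0))))) 0
    (by
      intro acc t _
      rw [PySem.List.foldl_congr_mem _ _ (fun acc k => max acc
          ((Finset.range (mat.getD 0 []).length).sup (fun l =>
            (Finset.range ((mat.getD 0 []).length - l)).sup (fun k2 =>
              if pvS mat (t+1+k) (l+1+k2) - pvS mat t (l+1+k2)
                  - pvS mat (t+1+k) l + pvS mat t l = 0
              then (k+1) * (k2+1) else 0)))) acc
        (by
          intro acc2 k _
          rw [PySem.List.foldl_congr_mem _ _ (fun acc l => max acc
              ((Finset.range ((mat.getD 0 []).length - l)).sup (fun k2 =>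
                if pvS mat (t+1+k) (l+1+k2) - pvS mat t (l+1+k2)
                    - pvS mat (t+1+k) l + pvS mat t l = 0
                then (k+1) * (k2+1) else 0))) acc2
            (by
              intro acc3 l _
              rw [PySem.List.foldl_congr_mem _ _ (fun acc k2 => max acc
                  (if pvS mat (t+1+k) (l+1+k2) - pvS mat t (l+1+k2)
                      - pvS mat (t+1+k) l + pvS mat t l = 0
                   then (k+1) * (k2+1) else 0)) acc3
                (by intro acc4 k2 _; exact hstep t k l acc4 k2)]
              rw [pvFoldl_max_absorb]
              congr 1
              exact pvFoldl_max_eq_sup _ _)]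
          rw [pvFoldl_max_absorb]
          congr 1
          exact pvFoldl_max_eq_sup _ _)]
      rw [pvFoldl_max_absorb]
      congr 1
      exact pvFoldl_max_eq_sup _ _)]
  exact pvFoldl_max_eq_sup _ _

theorem pvQB_eq_AREA (mat : List (List Int)) : pvQB mat = pvAREA mat := by
  rw [pvQB_sup]
  apply le_antisymm
  · apply Finset.sup_le
    intro t ht
    apply Finset.sup_le
    intro k hk
    apply Finset.sup_le
    intro l hl
    apply Finset.sup_le
    intro k2 hk2
    simp only [Finset.mem_range] at ht hk hl hk2
    split_ifs with hcond
    · have hmem : (((t, t+1+k), (l, l+1+k2)) : (ℕ × ℕ) × (ℕ × ℕ))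
          ∈ ((Finset.range (mat.length+1) ×ˢ Finset.range (mat.length+1)) ×ˢ
             (Finset.range ((mat.getD 0 []).length+1) ×ˢ
              Finset.range ((mat.getD 0 []).length+1))) := by
        simp only [Finset.mem_product, Finset.mem_range]
        refine ⟨⟨?_, ?_⟩, ?_, ?_⟩ <;> omega
      refine le_trans (le_of_eq ?_) (Finset.le_sup (f := fun q =>
        if q.1.1 < q.1.2 ∧ q.2.1 < q.2.2 ∧
            (∑ r ∈ Finset.Ico q.1.1 q.1.2, ∑ c ∈ Finset.Ico q.2.1 q.2.2, pvCell mat r c) = 0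
        then (q.1.2 - q.1.1) * (q.2.2 - q.2.1) else 0) hmem)
      dsimp only
      rw [if_pos]
      · have h1 : t + 1 + k - t = k + 1 := by omega
        have h2 : l + 1 + k2 - l = k2 + 1 := by omega
        rw [h1, h2]
      · refine ⟨by omega, by omega, ?_⟩
        rw [pvRect mat t (t+1+k) l (l+1+k2) (by omega) (by omega)]
        exact hcond
    · exact Nat.zero_le _
  · apply Finset.sup_le
    intro q hq
    simp only [Finset.mem_product, Finset.mem_range] at hq
    split_ifs with hcond
    · obtain ⟨htb, hlr, hsum⟩ := hcond
      refine le_trans ?_ (Finset.le_sup (Finset.mem_range.mpr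
        (show q.1.1 < mat.length by omega)))
      refine le_trans ?_ (Finset.le_sup (Finset.mem_range.mpr
        (show q.1.2 - q.1.1 - 1 < mat.length - q.1.1 by omega)))
      refine le_trans ?_ (Finset.le_sup (Finset.mem_range.mpr
        (show q.2.1 < (mat.getD 0 []).length by omega)))
      refine le_trans ?_ (Finset.le_sup (f := fun k2 =>
        if pvS mat (q.1.1+1+(q.1.2-q.1.1-1)) (q.2.1+1+k2) - pvS mat q.1.1 (q.2.1+1+k2)
            - pvS mat (q.1.1+1+(q.1.2-q.1.1-1)) q.2.1 + pvS mat q.1.1 q.2.1 = 0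
        then ((q.1.2-q.1.1-1)+1) * (k2+1) else 0)
        (Finset.mem_range.mpr
          (show q.2.2 - q.2.1 - 1 < (mat.getD 0 []).length - q.2.1 by omega)))
      have e1 : q.1.1 + 1 + (q.1.2 - q.1.1 - 1) = q.1.2 := by omega
      have e2 : q.2.1 + 1 + (q.2.2 - q.2.1 - 1) = q.2.2 := by omega
      dsimp only
      rw [e1, e2]
      rw [if_pos]
      · have h1 : q.1.2 - q.1.1 - 1 + 1 = q.1.2 - q.1.1 := by omega
        have h2 : q.2.2 - q.2.1 - 1 + 1 = q.2.2 - q.2.1 := by omega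
        rw [h1, h2]
      · rw [← pvRect mat q.1.1 q.1.2 q.2.1 q.2.2 (by omega) (by omega)]
        exact hsum
    · exact Nat.zero_le _

-- ===== VERDICT (by name: the statement is the Claim_ definition above) =====
theorem maximumArea_spec : Claim_equal_maximumArea := by
  intro mat n m _ _
  unfold Spec_maximumArea
  rw [pvPortA_eq, pvPortB_eq, pvNA_eq_AREA, pvQB_eq_AREA]
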